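-- pv_equiv track=rewrite | github.com/myshell-ai/ShellAgent | proconfig/widgets/imagen_widgets/comfy_nodes/comfy_nodes.py | add_suffixes
-- ===== SOURCE A (Python) =====
-- def add_suffixes(input_list):
--     count = {}
--     result = []
--     input_list = map(str, input_list)
--     for item in input_list:
--         if item in count:
--             count[item] += 1
--             result.append(f"{item}_{count[item]}")
--         else:
--             count[item] = 1
--             result.append(item)
--
--     # Second pass to correct the first occurrence of duplicates
--     for i in range(len(result)):
--         item = result[i]
--         if item in count and count[item] > 1:
--             result[i] = f"{item}_1"
--             count[item] -= 1
--
--     return result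
-- ===== SOURCE B (Python) =====
-- def add_suffixes(input_list):
--     items = [str(x) for x in input_list]
--     totals = {}
--     for it in items:
--         totals[it] = totals.get(it, 0) + 1
--     out = []
--     seen = {}
--     for it in items:
--         n = seen.get(it, 0) + 1
--         seen[it] = n
--         out.append(f"{it}_{n}" if totals[it] > 1 else it)
--     return out
-- ===== Notes on version B (the rewrite author's own statement) =====
-- stated objective: simpler
-- what changed: A emits suffixed names while counting and then runs a second in-place correction pass over the output to fix the first occurrence of each duplicate; B first builds a frequency table of the items and then emits each item in a single pass, suffixing with a running per-item counter whenever the total count exceeds 1, never revisiting the output.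
import Mathlib
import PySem

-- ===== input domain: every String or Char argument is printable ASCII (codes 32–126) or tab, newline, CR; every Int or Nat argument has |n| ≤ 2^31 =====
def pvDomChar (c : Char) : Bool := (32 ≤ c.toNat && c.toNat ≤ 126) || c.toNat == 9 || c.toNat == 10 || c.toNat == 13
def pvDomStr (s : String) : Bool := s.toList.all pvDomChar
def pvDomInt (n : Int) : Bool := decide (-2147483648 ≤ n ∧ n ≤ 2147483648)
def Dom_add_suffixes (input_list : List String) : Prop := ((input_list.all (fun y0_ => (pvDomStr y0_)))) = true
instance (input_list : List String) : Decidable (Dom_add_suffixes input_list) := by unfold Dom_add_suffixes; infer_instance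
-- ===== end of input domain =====

-- B replaces A's emit-then-correct two-pass (which patches the output list in place) by a
-- count-first single-emit pass over a precomputed frequency table; objective: simpler.
-- Pre_ excludes lists in which some duplicated item coincides with a suffixed name x_j that the
-- renaming itself could generate; on such collision inputs A's in-place second pass may relabel a
-- generated entry instead of the original item, an artefact of its emit-then-correct structure.


-- ===== PORT A =====
-- first loop body: count/emit one item ('str(x)' is the identity on the String domain)
def stepA (st : PySem.Dict String Int × List String) (item : String) :
    PySem.Dict String Int × List String :=
  match st.1.get? item with
  | some c => (st.1.insert item (c + 1), st.2 ++ [item ++ "_" ++ PySem.Int.toStr (c + 1)])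
  | none => (st.1.insert item 1, st.2 ++ [item])

-- second loop: walk result in index order, rewriting entries and decrementing counts in place
def pass2A : List String → PySem.Dict String Int → List String
  | [], _ => []
  | item :: rest, count =>
    match count.get? item with
    | some c =>
        if 1 < c then (item ++ "_1") :: pass2A rest (count.insert item (c - 1))
        else item :: pass2A rest count
    | none => item :: pass2A rest count

def add_suffixes (input_list : List String) : List String :=
  let r := input_list.foldl stepA (PySem.Dict.empty, [])
  pass2A r.2 r.1

-- ===== PORT B =====
-- one emit step; 'totals[it]' always hits a key, ported as getD with unused default 0
def stepB (totals : PySem.Dict String Int) (st : PySem.Dict String Int × List String)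
    (it : String) : PySem.Dict String Int × List String :=
  let n := st.1.getD it 0 + 1
  (st.1.insert it n, st.2 ++ [if 1 < totals.getD it 0 then it ++ "_" ++ PySem.Int.toStr n else it])

def add_suffixes_alt (input_list : List String) : List String :=
  let totals := input_list.foldl (fun (t : PySem.Dict String Int) it => t.insert it (t.getD it 0 + 1))
    PySem.Dict.empty
  (input_list.foldl (stepB totals) (PySem.Dict.empty, [])).2

-- ===== PRECONDITION & SPEC =====
-- Pre_ excludes lists in which a duplicated item equals x ++ "_" ++ str j for an item x with at
-- least j occurrences (j ≥ 2): exactly the suffix-collision corner described in the header.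
def Pre_add_suffixes (input_list : List String) : Prop :=
  ∀ x ∈ input_list, ∀ j ∈ List.range (input_list.count x + 1), 2 ≤ j →
    input_list.count (x ++ "_" ++ PySem.Int.toStr (j : Int)) ≤ 1
instance (input_list : List String) : Decidable (Pre_add_suffixes input_list) := by
  unfold Pre_add_suffixes; infer_instance

def pvWitness_add_suffixes : List String := ["a", "b", "a", "c", "a"]

def Spec_add_suffixes (input_list : List String) (out : List String) : Prop := out = add_suffixes_alt input_list
instance (input_list : List String) (out : List String) : Decidable (Spec_add_suffixes input_list out) := by unfold Spec_add_suffixes; infer_instance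

-- ===== CLAIM (what is proved, stated in full; the proofs are below) =====
def Claim_equal_add_suffixes : Prop := ∀ (input_list : List String), Dom_add_suffixes input_list → Pre_add_suffixes input_list → Spec_add_suffixes input_list (add_suffixes input_list)

-- ===== LEMMAS AND PROOFS =====

-- functional model of A's first loop: f = occurrence counts of the already-processed prefix
def pass1F (f : String → Int) : List String → List String
  | [] => []
  | it :: rest =>
    (if f it = 0 then it else it ++ "_" ++ PySem.Int.toStr (f it + 1)) ::
      pass1F (fun t => if t = it then f it + 1 else f t) rest

-- functional model of A's second loop: g = current value of the count dict (0 for absent keys)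
def pass2F : List String → (String → Int) → List String
  | [], _ => []
  | e :: rest, g =>
    if 1 < g e then (e ++ "_1") :: pass2F rest (fun t => if t = e then g e - 1 else g t)
    else e :: pass2F rest g

-- functional model of B's emitting loop: cnt = total counts, f = prefix counts
def specGo (cnt : String → Int) : List String → (String → Int) → List String
  | [], _ => []
  | it :: rest, f =>
    (if 1 < cnt it then it ++ "_" ++ PySem.Int.toStr (f it + 1) else it) ::
      specGo cnt rest (fun t => if t = it then f it + 1 else f t)

lemma stepA_sim (l : List String) :
    ∀ (d : PySem.Dict String Int) (acc : List String) (f : String → Int),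
    (∀ s, d.get? s = if f s = 0 then none else some (f s)) → (∀ s, 0 ≤ f s) →
    (l.foldl stepA (d, acc)).2 = acc ++ pass1F f l ∧
    (∀ s, (l.foldl stepA (d, acc)).1.get? s =
      if f s + l.count s = 0 then none else some (f s + l.count s)) := by
  induction l with
  | nil => intro d acc f hd hf; simp [pass1F, hd]
  | cons it rest ih =>
    intro d acc f hd hf
    have hstep : stepA (d, acc) it =
        (d.insert it (f it + 1),
          acc ++ [if f it = 0 then it else it ++ "_" ++ PySem.Int.toStr (f it + 1)]) := by
      by_cases h0 : f it = 0
      · simp [stepA, hd it, h0]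
      · simp [stepA, hd it, h0]
    have hd' : ∀ s, (d.insert it (f it + 1)).get? s =
        if (fun t => if t = it then f it + 1 else f t) s = 0 then none
        else some ((fun t => if t = it then f it + 1 else f t) s) := by
      intro s
      rw [PySem.Dict.get?_insert]
      by_cases hs : s = it
      · have := hf it; simp [hs]; omega
      · simp [hs, hd s]
    have hf' : ∀ s, 0 ≤ (fun t => if t = it then f it + 1 else f t) s := by
      intro s; have h1 := hf it; have h2 := hf s
      by_cases hs : s = it <;> simp [hs] <;> omega
    obtain ⟨h1, h2⟩ := ih (d.insert it (f it + 1))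
      (acc ++ [if f it = 0 then it else it ++ "_" ++ PySem.Int.toStr (f it + 1)])
      (fun t => if t = it then f it + 1 else f t) hd' hf'
    constructor
    · simp only [List.foldl_cons, hstep, h1, pass1F]
      simp
    · intro s
      simp only [List.foldl_cons, hstep, h2 s]
      by_cases hs : s = it
      · subst hs; simp [List.count_cons_self]; ring_nf
      · have : (it :: rest).count s = rest.count s := by
          rw [List.count_cons_of_ne]; exact fun h => hs h.symm
        simp [hs, this]

lemma pass2A_sim : ∀ (r : List String) (d : PySem.Dict String Int),
    pass2A r d = pass2F r (fun s => d.getD s 0) := by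
  intro r
  induction r with
  | nil => intro d; simp [pass2A, pass2F]
  | cons e rest ih =>
    intro d
    rcases hg : d.get? e with _ | c
    · have hgd : d.getD e 0 = 0 := by rw [PySem.Dict.getD_eq_get?_getD, hg]; rfl
      simp [pass2A, pass2F, hg, hgd, ih]
    · have hgd : d.getD e 0 = c := by rw [PySem.Dict.getD_eq_get?_getD, hg]; rfl
      by_cases hc : 1 < c
      · have harg : (fun s => (d.insert e (c - 1)).getD s 0) =
            (fun t => if t = e then d.getD e 0 - 1 else d.getD t 0) := by
          funext s; rw [PySem.Dict.getD_insert]; by_cases hs : s = e <;> simp [hs, hgd]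
        simp [pass2A, pass2F, hg, hgd, hc, ih, harg]
      · simp [pass2A, pass2F, hg, hgd, hc, ih]

lemma stepB_sim (totals : PySem.Dict String Int) (l : List String) :
    ∀ (d : PySem.Dict String Int) (acc : List String) (f : String → Int),
    (∀ s, d.getD s 0 = f s) →
    (l.foldl (stepB totals) (d, acc)).2 =
      acc ++ specGo (fun s => totals.getD s 0) l f := by
  induction l with
  | nil => intro d acc f hd; simp [specGo]
  | cons it rest ih =>
    intro d acc f hd
    have hd' : ∀ s, (d.insert it (f it + 1)).getD s 0 =
        (fun t => if t = it then f it + 1 else f t) s := by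
      intro s; rw [PySem.Dict.getD_insert]; by_cases hs : s = it <;> simp [hs, hd]
    have hstep : stepB totals (d, acc) it = (d.insert it (f it + 1),
        acc ++ [if 1 < totals.getD it 0 then it ++ "_" ++ PySem.Int.toStr (f it + 1) else it]) := by
      simp [stepB, hd it]
    rw [List.foldl_cons, hstep, ih _ _ _ hd']
    simp [specGo]

-- one-step unfolding equations for the functional models
lemma pass1F_cons_zero {f : String → Int} {it : String} {rest : List String} (h : f it = 0) :
    pass1F f (it :: rest) = it :: pass1F (fun t => if t = it then f it + 1 else f t) rest := by
  simp [pass1F, h]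

lemma pass1F_cons_pos {f : String → Int} {it : String} {rest : List String} (h : ¬ f it = 0) :
    pass1F f (it :: rest) =
      (it ++ "_" ++ PySem.Int.toStr (f it + 1)) ::
        pass1F (fun t => if t = it then f it + 1 else f t) rest := by
  simp [pass1F, h]

lemma pass2F_cons_pos {e : String} {rest : List String} {g : String → Int} (h : 1 < g e) :
    pass2F (e :: rest) g = (e ++ "_1") :: pass2F rest (fun t => if t = e then g e - 1 else g t) := by
  simp [pass2F, h]

lemma pass2F_cons_neg {e : String} {rest : List String} {g : String → Int} (h : ¬ 1 < g e) :
    pass2F (e :: rest) g = e :: pass2F rest g := by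
  simp [pass2F, h]

lemma specGo_cons_pos {cnt f : String → Int} {it : String} {rest : List String} (h : 1 < cnt it) :
    specGo cnt (it :: rest) f =
      (it ++ "_" ++ PySem.Int.toStr (f it + 1)) ::
        specGo cnt rest (fun t => if t = it then f it + 1 else f t) := by
  simp [specGo, h]

lemma specGo_cons_neg {cnt f : String → Int} {it : String} {rest : List String} (h : ¬ 1 < cnt it) :
    specGo cnt (it :: rest) f = it :: specGo cnt rest (fun t => if t = it then f it + 1 else f t) := by
  simp [specGo, h]

-- update of the prefix-count function when one item is appended to the prefix
lemma bump_count (p : List String) (it : String) :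
    (fun t => if t = it then ((p.count it : Int)) + 1 else ((p.count t : Int))) =
    (fun s => (((p ++ [it]).count s : Int))) := by
  funext s
  rcases eq_or_ne s it with hs | hs
  · rw [hs]; simp [List.count_append]
  · have hz : List.count s [it] = 0 := List.count_eq_zero.mpr (by simp [hs])
    simp [hs, List.count_append, hz]

-- the count-state function of pass 2, relative to the processed prefix p
def gFun (L p : List String) : String → Int :=
  fun s => ((L.count s : Int)) - (if 1 ≤ p.count s ∧ 2 ≤ L.count s then 1 else 0)

-- appending an item the prefix already contains, or whose total count stays < 2, keeps gFun
lemma gFun_stable (L p : List String) (it : String)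
    (h : 1 ≤ p.count it ∨ ¬ 2 ≤ L.count it) : gFun L p = gFun L (p ++ [it]) := by
  funext s
  rcases eq_or_ne s it with hs | hs
  · rw [hs]
    have hc : (p ++ [it]).count it = p.count it + 1 := by simp [List.count_append]
    simp only [gFun, hc]
    rcases h with h | h <;> split_ifs <;> omega
  · have hz : List.count s [it] = 0 := List.count_eq_zero.mpr (by simp [hs])
    simp [gFun, List.count_append, hz]

-- core: under Pre_, A's correction pass applied to pass-1 output emits exactly B's list
lemma core (L : List String) (hPre : Pre_add_suffixes L) :
    ∀ (rest p : List String), L = p ++ rest →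
    pass2F (pass1F (fun s => ((p.count s : Int))) rest) (gFun L p)
    = specGo (fun s => ((L.count s : Int))) rest (fun s => ((p.count s : Int))) := by
  intro rest
  induction rest with
  | nil => intro p hL; simp [pass1F, pass2F, specGo]
  | cons it rest' ih =>
    intro p hL
    have hmem : it ∈ L := by rw [hL]; simp
    have hcnt : p.count it + 1 ≤ L.count it := by
      rw [hL, List.count_append, List.count_cons_self]; omega
    have hL' : L = (p ++ [it]) ++ rest' := by rw [hL]; simp
    by_cases hp0 : p.count it = 0
    · -- first occurrence of it: emitted bare by pass 1
      have hf0 : ((p.count it : Int)) = 0 := by exact_mod_cast hp0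
      rw [pass1F_cons_zero hf0]
      by_cases h2 : 2 ≤ L.count it
      · -- duplicated: pass 2 rewrites it to it_1
        have hone : (1 : Int) < ((L.count it : Int)) := by exact_mod_cast h2
        have hg : 1 < gFun L p it := by simp only [gFun]; split_ifs <;> omega
        rw [pass2F_cons_pos hg, specGo_cons_pos hone]
        have hhead : it ++ "_1" = it ++ "_" ++ PySem.Int.toStr (((p.count it : Int)) + 1) := by
          rw [hf0, String.append_assoc]; congr 1
        have hnewg : (fun t => if t = it then gFun L p it - 1 else gFun L p t) =
            gFun L (p ++ [it]) := by
          funext s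
          rcases eq_or_ne s it with hs | hs
          · rw [hs]
            have hc : (p ++ [it]).count it = 1 := by simp [List.count_append, hp0]
            simp only [gFun, hc, hp0]
            split_ifs <;> omega
          · have hz : List.count s [it] = 0 := List.count_eq_zero.mpr (by simp [hs])
            simp [hs, gFun, List.count_append, hz]
        rw [hhead, bump_count, hnewg, ih (p ++ [it]) hL']
      · -- unique: pass 2 leaves it alone
        have hone : ¬ (1 : Int) < ((L.count it : Int)) := by omega
        have hg : ¬ 1 < gFun L p it := by simp only [gFun]; split_ifs <;> omega
        rw [pass2F_cons_neg hg, specGo_cons_neg hone, bump_count,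
          gFun_stable L p it (Or.inr h2), ih (p ++ [it]) hL']
    · -- later occurrence: pass 1 emits it_j; Pre_ guarantees pass 2 never touches it
      have hfne : ¬ ((p.count it : Int)) = 0 := by exact_mod_cast hp0
      have h2 : 2 ≤ L.count it := by omega
      have hone : (1 : Int) < ((L.count it : Int)) := by exact_mod_cast h2
      rw [pass1F_cons_pos hfne, specGo_cons_pos hone]
      have hcnte : L.count (it ++ "_" ++ PySem.Int.toStr (((p.count it : Int)) + 1)) ≤ 1 := by
        have hj : p.count it + 1 ∈ List.range (L.count it + 1) := by
          rw [List.mem_range]; omega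
        have h := hPre it hmem (p.count it + 1) hj (by omega)
        have hcast : ((((p.count it + 1 : Nat)) : Int)) = ((p.count it : Int)) + 1 := by
          push_cast; ring
        rwa [hcast] at h
      have hg : ¬ 1 < gFun L p (it ++ "_" ++ PySem.Int.toStr (((p.count it : Int)) + 1)) := by
        have : ((L.count (it ++ "_" ++ PySem.Int.toStr (((p.count it : Int)) + 1)) : Int)) ≤ 1 := by
          exact_mod_cast hcnte
        simp only [gFun]; split_ifs <;> omega
      rw [pass2F_cons_neg hg, bump_count,
        gFun_stable L p it (Or.inl (by omega)), ih (p ++ [it]) hL']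

lemma getD_final (l : List String) :
    (fun s => (l.foldl stepA (PySem.Dict.empty, ([] : List String))).1.getD s 0) =
    (fun s => ((l.count s : Int))) := by
  obtain ⟨-, h2⟩ := stepA_sim l PySem.Dict.empty [] (fun _ => 0)
    (by intro s; simp) (by intro s; simp)
  funext s
  rw [PySem.Dict.getD_eq_get?_getD, h2 s]
  split_ifs with h
  · simp
    omega
  · simp

lemma zero_count : (fun s => (([] : List String).count s : Int)) = (fun _ => (0 : Int)) := by
  funext s; simp

-- ===== VERDICT (by name: the statement is the Claim_ definition above) =====
theorem add_suffixes_spec : Claim_equal_add_suffixes := by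
  intro l _ hPre
  unfold Spec_add_suffixes
  show pass2A (l.foldl stepA (PySem.Dict.empty, [])).2 (l.foldl stepA (PySem.Dict.empty, [])).1 =
    (l.foldl (stepB (l.foldl (fun (t : PySem.Dict String Int) it => t.insert it (t.getD it 0 + 1))
      PySem.Dict.empty)) (PySem.Dict.empty, [])).2
  obtain ⟨h1, -⟩ := stepA_sim l PySem.Dict.empty [] (fun _ => 0)
    (by intro s; simp) (by intro s; simp)
  rw [h1, pass2A_sim, getD_final l]
  simp only [List.nil_append]
  have hB := stepB_sim (l.foldl (fun (t : PySem.Dict String Int) it => t.insert it (t.getD it 0 + 1))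
      PySem.Dict.empty) l PySem.Dict.empty [] (fun _ => 0) (by intro s; simp)
  rw [hB]
  have htot : (fun s => (l.foldl (fun (t : PySem.Dict String Int) it => t.insert it (t.getD it 0 + 1))
      PySem.Dict.empty).getD s 0) = (fun s => ((l.count s : Int))) := by
    funext s; rw [PySem.Dict.getD_foldl_insert_add_one]; simp
  rw [htot]
  have hcore := core l hPre l [] rfl
  have hg : gFun l [] = (fun s => ((l.count s : Int))) := by
    funext s; simp [gFun]
  rw [hg, zero_count] at hcore
  rw [hcore, List.nil_append]
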